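-- pv_equiv track=rewrite | github.com/MrBrantCode/unitest_baseline | mut_generate/mist_train_cf/cf_14808/solution.py | first_three_distinct_positions
-- ===== SOURCE A (Python) =====
-- def first_three_distinct_positions(array):
--     """
--     Returns the indices of the first three distinct elements in the array.
--
--     Args:
--         array (list): Input array.
--
--     Returns:
--         list: Indices of the first three distinct elements.
--     """
--     positions = []
--     count = 0
--
--     for i, num in enumerate(array):
--         if num not in array[:i] and count < 3:
--             positions.append(i)
--             count += 1
--
--     return positions
-- ===== SOURCE B (Python) =====
-- def first_three_distinct_positions(array):
--     """
--     Returns the indices of the first three distinct elements in the array.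
--     """
--     distinct = []
--     for num in array:
--         if num not in distinct:
--             distinct.append(num)
--     return [array.index(x) for x in distinct[:3]]
-- ===== Notes on version B (the rewrite author's own statement) =====
-- stated objective: alternative
-- what changed: Replaces A's single count-guarded scan (testing each element against the growing prefix slice array[:i]) with a build-then-lookup decomposition: one pass builds the distinct-values list in first-occurrence order, then the first three values are mapped back to indices with array.index.
import Mathlib
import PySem

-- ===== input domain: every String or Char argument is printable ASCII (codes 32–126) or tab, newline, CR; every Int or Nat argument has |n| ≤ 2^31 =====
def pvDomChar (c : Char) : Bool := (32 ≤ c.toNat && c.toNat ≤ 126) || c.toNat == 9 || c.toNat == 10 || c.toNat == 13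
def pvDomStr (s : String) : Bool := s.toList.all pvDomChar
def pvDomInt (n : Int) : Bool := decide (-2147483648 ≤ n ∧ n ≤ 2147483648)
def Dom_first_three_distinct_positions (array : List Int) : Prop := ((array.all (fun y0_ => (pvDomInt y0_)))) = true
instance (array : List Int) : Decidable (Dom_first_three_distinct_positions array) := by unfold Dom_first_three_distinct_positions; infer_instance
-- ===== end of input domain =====

-- B rewrites A's count-guarded prefix-slice scan as a build-then-lookup decomposition (alternative, same behaviour).


-- ===== PORT A =====
-- for i, num in enumerate(array): if num not in array[:i] and count < 3: positions.append(i); count += 1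
def first_three_distinct_positions (array : List Int) : List Int :=
  ((PySem.List.enumerate array).foldl
    (fun (st : List Int × Int) (p : Int × Int) =>
      if p.2 ∉ PySem.List.slice array (some 0) (some p.1) ∧ st.2 < 3 then
        (st.1 ++ [p.1], st.2 + 1)
      else st) (([] : List Int), (0 : Int))).1

-- ===== PORT B =====
-- distinct = []; for num in array: if num not in distinct: distinct.append(num)
-- return [array.index(x) for x in distinct[:3]]
def first_three_distinct_positions_alt (array : List Int) : List Int :=
  let distinct := array.foldl (fun d num => if num ∈ d then d else d ++ [num]) ([] : List Int)
  (PySem.List.slice distinct none (some 3)).map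
    (fun x => match PySem.List.index? array x with
      | some i => (i : Int)
      | none => 0)   -- never 'none': every x in distinct occurs in array, so array.index(x) cannot raise

-- ===== PRECONDITION & SPEC =====
def Spec_first_three_distinct_positions (array : List Int) (out : List Int) : Prop := out = first_three_distinct_positions_alt array
instance (array : List Int) (out : List Int) : Decidable (Spec_first_three_distinct_positions array out) := by unfold Spec_first_three_distinct_positions; infer_instance

-- ===== CLAIM (what is proved, stated in full; the proofs are below) =====
def Claim_equal_first_three_distinct_positions : Prop := ∀ (array : List Int), Dom_first_three_distinct_positions array → Spec_first_three_distinct_positions array (first_three_distinct_positions array)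

-- ===== LEMMAS AND PROOFS =====

-- first-occurrence positions of `rest` relative to the already-seen prefix `pre`
def pvF : List Int → List Int → List Int
  | _, [] => []
  | pre, x :: xs =>
    if x ∈ pre then pvF (pre ++ [x]) xs
    else (pre.length : Int) :: pvF (pre ++ [x]) xs

-- distinct values of `rest` not already in `d`, in first-occurrence order
def pvND : List Int → List Int → List Int
  | _, [] => []
  | d, x :: xs => if x ∈ d then pvND d xs else x :: pvND (d ++ [x]) xs

lemma pv_foldl_dedup (rest d : List Int) :
    rest.foldl (fun d num => if num ∈ d then d else d ++ [num]) d = d ++ pvND d rest := by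
  induction rest generalizing d with
  | nil => simp [pvND]
  | cons x xs ih =>
    simp only [List.foldl_cons, pvND]
    by_cases hx : x ∈ d
    · simp [hx, ih]
    · simp [hx, ih, List.append_assoc]

lemma pv_A_aux (rest pre acc : List Int) (c : Int) (hc : 0 ≤ c) (array : List Int)
    (harr : array = pre ++ rest) :
    ((PySem.List.enumerate rest (pre.length : Int)).foldl
      (fun (st : List Int × Int) (p : Int × Int) =>
        if p.2 ∉ PySem.List.slice array (some 0) (some p.1) ∧ st.2 < 3 then
          (st.1 ++ [p.1], st.2 + 1)
        else st) (acc, c)).1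
      = acc ++ (pvF pre rest).take (3 - c).toNat := by
  induction rest generalizing pre acc c with
  | nil => simp [PySem.List.enumerate_nil, pvF]
  | cons x xs ih =>
    rw [PySem.List.enumerate_cons, List.foldl_cons]
    have hslice : PySem.List.slice array (some 0) (some (pre.length : Int)) = pre := by
      simp [PySem.List.slice_zero_start, PySem.List.slice_to_natCast, harr]
    have harr' : array = (pre ++ [x]) ++ xs := by simp [harr]
    by_cases hx : x ∈ pre
    · have hcond : ¬ ((x ∉ PySem.List.slice array (some 0) (some (pre.length : Int))) ∧ c < 3) := by
        simp [hslice, hx]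
      rw [if_neg hcond,
        show ((pre.length : Int) + 1) = (((pre ++ [x]).length : Nat) : Int) by simp,
        ih (pre ++ [x]) acc c hc harr']
      simp [pvF, hx]
    · by_cases hc3 : c < 3
      · have hcond : (x ∉ PySem.List.slice array (some 0) (some (pre.length : Int))) ∧ c < 3 := by
          simp [hslice, hx, hc3]
        rw [if_pos hcond,
          show ((pre.length : Int) + 1) = (((pre ++ [x]).length : Nat) : Int) by simp,
          ih (pre ++ [x]) (acc ++ [(pre.length : Int)]) (c + 1) (by omega) harr']
        have htk : (3 - c).toNat = (3 - (c + 1)).toNat + 1 := by omega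
        simp [pvF, hx, htk, List.append_assoc]
      · have hcond : ¬ ((x ∉ PySem.List.slice array (some 0) (some (pre.length : Int))) ∧ c < 3) := by
          simp [hc3]
        rw [if_neg hcond,
          show ((pre.length : Int) + 1) = (((pre ++ [x]).length : Nat) : Int) by simp,
          ih (pre ++ [x]) acc c hc harr']
        have htk : (3 - c).toNat = 0 := by omega
        simp [pvF, hx, htk]

lemma pv_B_aux (rest pre d : List Int) (array : List Int)
    (harr : array = pre ++ rest) (hd : ∀ v, v ∈ d ↔ v ∈ pre) :
    (pvND d rest).map
      (fun x => match PySem.List.index? array x with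
        | some i => (i : Int)
        | none => 0)
      = pvF pre rest := by
  induction rest generalizing pre d with
  | nil => simp [pvND, pvF]
  | cons x xs ih =>
    have harr' : array = (pre ++ [x]) ++ xs := by simp [harr]
    by_cases hx : x ∈ pre
    · have hxd : x ∈ d := (hd x).2 hx
      have hd' : ∀ v, v ∈ d ↔ v ∈ pre ++ [x] := by
        intro v; rw [hd v]
        constructor
        · intro h; exact List.mem_append_left _ h
        · intro h
          rcases List.mem_append.1 h with h | h
          · exact h
          · simp at h; subst h; exact hx
      simp only [pvND, pvF, if_pos hxd, if_pos hx]
      exact ih (pre ++ [x]) d harr' hd'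
    · have hxd : x ∉ d := fun h => hx ((hd x).1 h)
      have hidx : PySem.List.index? array x = some pre.length := by
        rw [harr', PySem.List.index?_append_of_mem xs (by simp)]
        exact PySem.List.index?_append_singleton_self pre x hx
      have hd' : ∀ v, v ∈ d ++ [x] ↔ v ∈ pre ++ [x] := by
        intro v; simp [hd v]
      simp only [pvND, pvF, if_neg hxd, if_neg hx, List.map_cons, hidx]
      rw [ih (pre ++ [x]) (d ++ [x]) harr' hd']

-- ===== VERDICT (by name: the statement is the Claim_ definition above) =====
theorem first_three_distinct_positions_spec : Claim_equal_first_three_distinct_positions := by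
  intro array _
  unfold Spec_first_three_distinct_positions first_three_distinct_positions
    first_three_distinct_positions_alt
  have hA := pv_A_aux array [] [] 0 (by norm_num) array (by simp)
  simp only [List.length_nil, Nat.cast_zero] at hA
  rw [show PySem.List.enumerate array = PySem.List.enumerate array (0 : Int) from rfl, hA]
  rw [pv_foldl_dedup array []]
  have hslice : PySem.List.slice (pvND [] array) none (some (3 : Int)) = (pvND [] array).take 3 := by
    rw [PySem.List.slice_to _ (by norm_num)]
    rfl
  simp only [List.nil_append, hslice]
  rw [List.map_take, pv_B_aux array [] [] array (by simp) (by simp)]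
  have : (3 - (0:Int)).toNat = 3 := by rfl
  rw [this]
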